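-- pv_equiv track=rewrite | github.com/steadydoer/problem-solving | programmers/kakao/60058/solution.py | split_bracket
-- ===== SOURCE A (Python) =====
-- def split_bracket(w):
--     u = ''
--     v = ''
--     store = 0
--     for i, c in enumerate(w):
--         if c == '(':
--             store += 1
--         else:
--             store -= 1
--         if store == 0:
--             u = w[:i + 1]
--             v = w[i + 1:]
--             break
--
--     return u, v
-- ===== SOURCE B (Python) =====
-- def split_bracket(w):
--     # prefix-balance table built from closed-form counts, then a separate search pass
--     bal = [2 * w[:k].count('(') - k for k in range(1, len(w) + 1)]
--     i = next((j for j, b in enumerate(bal) if b == 0), None)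
--     if i is None:
--         return '', ''
--     return w[:i + 1], w[i + 1:]
-- ===== Notes on version B (the rewrite author's own statement) =====
-- stated objective: alternative
-- what changed: Replaces the fused accumulator loop with break by a two-pass scheme: a table of prefix balances, each computed in closed form from the count of opening brackets in that prefix, followed by a separate search for the first zero entry; this trades A's single linear pass for a clearer table-then-search structure at quadratic cost.
import Mathlib
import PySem

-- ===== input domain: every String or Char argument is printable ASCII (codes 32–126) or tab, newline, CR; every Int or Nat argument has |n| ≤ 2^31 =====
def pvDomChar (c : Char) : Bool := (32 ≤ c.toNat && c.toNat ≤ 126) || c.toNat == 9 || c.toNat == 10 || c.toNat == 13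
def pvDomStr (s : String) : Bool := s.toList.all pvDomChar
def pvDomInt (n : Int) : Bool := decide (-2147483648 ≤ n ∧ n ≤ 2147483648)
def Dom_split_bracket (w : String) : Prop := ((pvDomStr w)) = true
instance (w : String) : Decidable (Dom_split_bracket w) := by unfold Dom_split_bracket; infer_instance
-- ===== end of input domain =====

-- B replaces A's fused accumulator loop (with break) by a closed-form prefix-balance table plus a separate first-zero search (objective: alternative).

-- ===== PORT A =====
-- the for-loop with break: recursion over the remaining characters, carrying the index and the running store
def splitA_go (l : List Char) (i : Nat) (store : Int) : List Char → String × String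
  | [] => ("", "")
  | c :: rest =>
      let store' := if c = '(' then store + 1 else store - 1
      if store' = 0 then (String.ofList (l.take (i + 1)), String.ofList (l.drop (i + 1)))  -- w[:i+1], w[i+1:] with 0 ≤ i: exact
      else splitA_go l (i + 1) store' rest

def split_bracket (w : String) : String × String :=
  splitA_go w.toList 0 0 w.toList

-- ===== PORT B =====
-- next((j for j, b in enumerate(bal) if b == 0), None)
def splitB_find (j : Nat) : List Int → Option Nat
  | [] => none
  | b :: rest => if b = 0 then some j else splitB_find (j + 1) rest

-- bal: w[:k] with 0 ≤ k is take k; single-char str.count = list count of that char: exact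
def split_bracket_alt (w : String) : String × String :=
  match splitB_find 0 ((PySem.List.pyRange 1 ((w.toList.length : Int) + 1) 1).map
      (fun k => 2 * (((w.toList.take k.toNat).count '(' : Int)) - k)) with
  | none => ("", "")
  | some i => (String.ofList (w.toList.take (i + 1)), String.ofList (w.toList.drop (i + 1)))

-- ===== PRECONDITION & SPEC =====
def Spec_split_bracket (w : String) (out : String × String) : Prop := out = split_bracket_alt w
instance (w : String) (out : String × String) : Decidable (Spec_split_bracket w out) := by unfold Spec_split_bracket; infer_instance

-- ===== CLAIM (what is proved, stated in full; the proofs are below) =====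
def Claim_equal_split_bracket : Prop := ∀ (w : String), Dom_split_bracket w → Spec_split_bracket w (split_bracket w)

-- ===== LEMMAS AND PROOFS =====
def pvBal (l : List Char) (k : Nat) : Int := 2 * (((l.take k).count '(' : Int)) - k

theorem pvBal_succ (l : List Char) (k : Nat) (h : k < l.length) :
    pvBal l (k + 1) = pvBal l k + (if l[k] = '(' then 1 else -1) := by
  unfold pvBal
  have h2 : l.take (k + 1) = l.take k ++ [l[k]] := by
    rw [List.take_add_one, List.getElem?_eq_getElem h]
    rfl
  rw [h2, List.count_append]
  by_cases hc : l[k] = '(' <;> simp [hc] <;> ring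

theorem pv_main (l : List Char) : ∀ (m i : Nat), i + m = l.length →
    splitA_go l i (pvBal l i) (l.drop i) =
      (match splitB_find i ((List.range' (i + 1) m).map (fun k => pvBal l k)) with
       | none => (("" : String), ("" : String))
       | some j => (String.ofList (l.take (j + 1)), String.ofList (l.drop (j + 1)))) := by
  intro m
  induction m with
  | zero =>
      intro i hi
      simp at hi
      simp [hi, List.drop_length, splitA_go, List.range', splitB_find]
  | succ m ih =>
      intro i hi
      have hlt : i < l.length := by omega
      rw [List.drop_eq_getElem_cons hlt]
      rw [List.range'_succ]
      simp only [splitA_go, List.map_cons, splitB_find]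
      have hstep : (if l[i] = '(' then pvBal l i + 1 else pvBal l i - 1) = pvBal l (i + 1) := by
        rw [pvBal_succ l i hlt]; split_ifs <;> ring
      rw [hstep]
      by_cases hz : pvBal l (i + 1) = 0
      · simp [hz]
      · simp only [hz, if_false]
        exact ih (i + 1) (by omega)

theorem pv_balList (l : List Char) :
    (PySem.List.pyRange 1 ((l.length : Int) + 1) 1).map
        (fun k => 2 * (((l.take k.toNat).count '(' : Int)) - k)
      = (List.range' 1 l.length).map (fun k => pvBal l k) := by
  rw [PySem.List.pyRange_one, List.range'_eq_map_range]
  have hn : (((l.length : Int) + 1 - 1)).toNat = l.length := by omega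
  rw [hn, List.map_map, List.map_map]
  apply List.map_congr_left
  intro k _
  simp only [Function.comp]
  unfold pvBal
  have h1 : ((1 : Int) + (k : Int)).toNat = 1 + k := by omega
  rw [h1]
  push_cast
  ring_nf

-- ===== VERDICT (by name: the statement is the Claim_ definition above) =====
theorem split_bracket_spec : Claim_equal_split_bracket := by
  intro w _
  unfold Spec_split_bracket split_bracket split_bracket_alt
  rw [pv_balList]
  have h0 : pvBal w.toList 0 = 0 := by unfold pvBal; simp
  have := pv_main w.toList w.toList.length 0 (by omega)
  rw [h0, List.drop_zero] at this
  simpa using this
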